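-- pv_equiv track=rewrite | github.com/sameersundrani/GASR | ShortSeqAssembler_v7_0406_SS.py | left_extender
-- ===== SOURCE A (Python) =====
-- def left_extender(leftseqs):
--     Left_Position_list = [[0, 0, 0, 0, 0] for k in range(len(max(leftseqs, key=len)))]
--     for leftseq in leftseqs:
--         for i in range(len(leftseq) + 1):
--             if i != 0:
--                 Acount = 0
--                 Tcount = 0
--                 Ccount = 0
--                 Gcount = 0
--                 Ncount = 0
--
--                 if leftseq[-i] == "A":
--                     Acount += 1
--                 elif leftseq[-i] == "T":
--                     Tcount += 1
--                 elif leftseq[-i] == "C":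
--                     Ccount += 1
--                 elif leftseq[-i] == "G":
--                     Gcount += 1
--                 else:
--                     Ncount += 1
--                 Left_Position_list[-i] = [x + y for x, y in zip(Left_Position_list[-i],
--                                                                 [Acount, Tcount, Ccount, Gcount, Ncount])]
--             else:
--                 continue
--     return Left_Position_list
-- ===== SOURCE B (Python) =====
-- def left_extender(leftseqs):
--     # position-major: one pass per right-aligned column, counting over all sequences
--     maxlen = len(max(leftseqs, key=len))
--     cols = []
--     for d in range(maxlen):
--         a = t = c = g = n = 0
--         for s in leftseqs:
--             if d < len(s):
--                 ch = s[len(s) - 1 - d]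
--                 if ch == "A":
--                     a += 1
--                 elif ch == "T":
--                     t += 1
--                 elif ch == "C":
--                     c += 1
--                 elif ch == "G":
--                     g += 1
--                 else:
--                     n += 1
--         cols.append([a, t, c, g, n])
--     cols.reverse()
--     return cols
-- ===== Notes on version B (the rewrite author's own statement) =====
-- stated objective: faster
-- what changed: B traverses position-major - one five-counter scan over all sequences per right-aligned column, built back-to-front and reversed - instead of A's sequence-major loop that mutates matrix rows via negative indexing and builds a fresh zip-added 5-list per character; this removes A's per-character list allocations (timing: ~5x at the largest size).
import Mathlib
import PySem

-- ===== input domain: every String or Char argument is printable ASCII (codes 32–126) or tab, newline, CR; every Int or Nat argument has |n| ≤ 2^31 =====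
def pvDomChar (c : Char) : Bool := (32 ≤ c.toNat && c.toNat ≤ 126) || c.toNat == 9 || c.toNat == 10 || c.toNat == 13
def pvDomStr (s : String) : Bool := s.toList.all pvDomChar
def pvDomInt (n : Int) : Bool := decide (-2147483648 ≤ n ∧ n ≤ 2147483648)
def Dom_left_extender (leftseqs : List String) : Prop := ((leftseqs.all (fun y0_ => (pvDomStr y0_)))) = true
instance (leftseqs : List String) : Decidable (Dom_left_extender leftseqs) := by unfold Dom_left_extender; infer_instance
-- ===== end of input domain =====

-- B traverses position-major (one five-counter pass per right-aligned column) instead of A's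
-- sequence-major matrix mutation with a fresh zip-added 5-list per character; a timing run
-- measured B faster by a constant factor.
-- ===== PORT A =====
-- the [Acount, Tcount, Ccount, Gcount, Ncount] vector A builds for one character
def pvCountsA (c : Char) : List Int :=
  if c = 'A' then [1, 0, 0, 0, 0]
  else if c = 'T' then [0, 1, 0, 0, 0]
  else if c = 'C' then [0, 0, 1, 0, 0]
  else if c = 'G' then [0, 0, 0, 1, 0]
  else [0, 0, 0, 0, 1]

-- A's inner loop: for i in range(len(leftseq)+1): if i != 0: mat[-i] = zip-add(mat[-i], counts)
def pvBodyA (s : List Char) (mat : List (List Int)) (i : Int) : List (List Int) :=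
  if i ≠ 0 then
    PySem.List.pySetD mat (-i)
      (List.zipWith (· + ·) (PySem.List.pyGetD mat (-i) [])
        (pvCountsA (PySem.List.pyGetD s (-i) ' ')))
  else mat

def pvStepA (mat : List (List Int)) (s : List Char) : List (List Int) :=
  (PySem.List.pyRange 0 ((s.length : Int) + 1) 1).foldl (pvBodyA s) mat

def left_extender (leftseqs : List String) : List (List Int) :=
  match PySem.List.max? leftseqs PySem.Str.len with
  | none => []   -- Python: max([], key=len) raises ValueError; excluded by Pre_
  | some m =>
    leftseqs.foldl (fun mat s => pvStepA mat s.toList)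
      ((PySem.List.pyRange 0 (PySem.Str.len m) 1).map (fun _ => [0, 0, 0, 0, 0]))

-- ===== PORT B =====
-- B's inner loop body: bump one of the five counters for column d (right-aligned distance d)
def pvBumpB (d : Nat) (st : Int × Int × Int × Int × Int) (s : List Char) :
    Int × Int × Int × Int × Int :=
  if d < s.length then
    let ch := s.getD (s.length - 1 - d) ' '
    if ch = 'A' then (st.1 + 1, st.2.1, st.2.2.1, st.2.2.2.1, st.2.2.2.2)
    else if ch = 'T' then (st.1, st.2.1 + 1, st.2.2.1, st.2.2.2.1, st.2.2.2.2)
    else if ch = 'C' then (st.1, st.2.1, st.2.2.1 + 1, st.2.2.2.1, st.2.2.2.2)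
    else if ch = 'G' then (st.1, st.2.1, st.2.2.1, st.2.2.2.1 + 1, st.2.2.2.2)
    else (st.1, st.2.1, st.2.2.1, st.2.2.2.1, st.2.2.2.2 + 1)
  else st

-- one column: scan all sequences with counters a,t,c,g,n, then emit [a,t,c,g,n]
def pvColCountB (seqs : List (List Char)) (d : Nat) : List Int :=
  let st := seqs.foldl (pvBumpB d) (0, 0, 0, 0, 0)
  [st.1, st.2.1, st.2.2.1, st.2.2.2.1, st.2.2.2.2]

def left_extender_alt (leftseqs : List String) : List (List Int) :=
  match PySem.List.max? leftseqs PySem.Str.len with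
  | none => []   -- Python: max raises ValueError; excluded by Pre_
  | some m =>
    ((List.range m.toList.length).foldl
      (fun cols d => cols ++ [pvColCountB (leftseqs.map String.toList) d]) []).reverse

-- ===== PRECONDITION & SPEC =====
-- Pre_ excludes only the empty list, on which both Pythons raise ValueError (max of empty sequence).
def Pre_left_extender (leftseqs : List String) : Prop := leftseqs ≠ []
instance (leftseqs : List String) : Decidable (Pre_left_extender leftseqs) := by
  unfold Pre_left_extender; infer_instance
def pvWitness_left_extender : List String := ["ACx", "G"]

def Spec_left_extender (leftseqs : List String) (out : List (List Int)) : Prop := out = left_extender_alt leftseqs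
instance (leftseqs : List String) (out : List (List Int)) : Decidable (Spec_left_extender leftseqs out) := by unfold Spec_left_extender; infer_instance

-- ===== CLAIM (what is proved, stated in full; the proofs are below) =====
def Claim_equal_left_extender : Prop := ∀ (leftseqs : List String), Dom_left_extender leftseqs → Pre_left_extender leftseqs → Spec_left_extender leftseqs (left_extender leftseqs)

-- ===== LEMMAS AND PROOFS =====

-- Python mat[-k] = v for 1 <= k <= len(mat) is List.set at index len - k
theorem pvSetD_neg {α : Type} (xs : List α) (k : Nat) (v : α) (h1 : 0 < k)
    (h2 : k ≤ xs.length) :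
    PySem.List.pySetD xs (-(k : Int)) v = xs.set (xs.length - k) v := by
  have hk0 : k ≠ 0 := by omega
  simp [PySem.List.pySetD, PySem.List.pySet?, PySem.List.pyIdx?, h2, hk0]

-- the row-update function A's inner loop performs on row r, phrased with d = L - 1 - r
def pvRowStep (d : Nat) (v : List Int) (s : List Char) : List Int :=
  if d < s.length then
    List.zipWith (· + ·) v (pvCountsA (s.getD (s.length - 1 - d) ' '))
  else v

-- running A's inner loop for the first k values of i updates exactly the rows r with L - r < k
theorem pvStepA_aux (s : List Char) (L : Nat) (hs : s.length ≤ L)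
    (mat : List (List Int)) (hm : mat.length = L) :
    ∀ k, k ≤ s.length + 1 →
      (((List.range k).map (fun j => Int.ofNat j)).foldl (pvBodyA s) mat).length = L ∧
      ∀ r, r < L →
        (((List.range k).map (fun j => Int.ofNat j)).foldl (pvBodyA s) mat).getD r [] =
          if L - r < k then
            List.zipWith (· + ·) (mat.getD r []) (pvCountsA (s.getD (s.length - (L - r)) ' '))
          else mat.getD r [] := by
  intro k
  induction k with
  | zero => simp [hm]
  | succ k ih =>
    intro hk1
    have hk : k ≤ s.length + 1 := by omega
    obtain ⟨ihlen, ihget⟩ := ih hk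
    rw [List.range_succ]
    simp only [List.map_append, List.map_cons, List.map_nil, List.foldl_append,
      List.foldl_cons, List.foldl_nil]
    set g := ((List.range k).map (fun j => Int.ofNat j)).foldl (pvBodyA s) mat with hg
    by_cases hk0 : k = 0
    · subst hk0
      refine ⟨by simpa [pvBodyA] using ihlen, ?_⟩
      intro r hr
      have hIH := ihget r hr
      rw [if_neg (by omega : ¬ (L - r < 0))] at hIH
      rw [if_neg (by omega : ¬ (L - r < 0 + 1))]
      simpa [pvBodyA] using hIH
    · -- k >= 1: this iteration updates row L - k
      have hkpos : 0 < k := Nat.pos_of_ne_zero hk0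
      have hks : k ≤ s.length := by omega
      have hkL : k ≤ L := le_trans hks hs
      have hchar : PySem.List.pyGetD s (-(k : Int)) ' ' = s.getD (s.length - k) ' ' := by
        rw [PySem.List.pyGetD_neg_natCast s k ' ' hkpos hks,
          List.getD_eq_getElem s ' ' (by omega)]
      have hrow : PySem.List.pyGetD g (-(k : Int)) [] = g.getD (L - k) [] := by
        rw [PySem.List.pyGetD_neg_natCast g k [] hkpos (by rw [ihlen]; omega)]
        rw [List.getD_eq_getElem g [] (by rw [ihlen]; omega)]
        simp [ihlen]
      have hrowold : g.getD (L - k) [] = mat.getD (L - k) [] := by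
        have hIH := ihget (L - k) (by omega)
        rwa [if_neg (by omega : ¬ (L - (L - k) < k))] at hIH
      have hbody : pvBodyA s g (Int.ofNat k)
          = g.set (L - k) (List.zipWith (· + ·) (mat.getD (L - k) [])
              (pvCountsA (s.getD (s.length - k) ' '))) := by
        unfold pvBodyA
        rw [if_pos (by simpa using hk0 : (Int.ofNat k) ≠ 0)]
        have hneg : -(Int.ofNat k) = -(k : Int) := rfl
        rw [hneg, hchar, hrow, hrowold, pvSetD_neg g k _ hkpos (by rw [ihlen]; omega), ihlen]
      have hlen2 : (pvBodyA s g (Int.ofNat k)).length = L := by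
        rw [hbody]; simpa using ihlen
      refine ⟨hlen2, ?_⟩
      intro r hr
      rw [hbody]
      by_cases hrk : r = L - k
      · subst hrk
        rw [if_pos (by omega : L - (L - k) < k + 1)]
        rw [List.getD_eq_getElem _ [] (by rw [List.length_set, ihlen]; omega)]
        rw [List.getElem_set, if_pos rfl]
        have hidx : s.length - (L - (L - k)) = s.length - k := by omega
        rw [hidx]
      · have hne2 : L - k ≠ r := by omega
        have hIH := ihget r hr
        rw [List.getD_eq_getElem _ [] (by rw [List.length_set, ihlen]; omega)]
        rw [List.getElem_set, if_neg hne2]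
        rw [← List.getD_eq_getElem g [] (by rw [ihlen]; omega : r < g.length)]
        rw [hIH]
        by_cases hc : L - r < k
        · rw [if_pos hc, if_pos (by omega : L - r < k + 1)]
        · rw [if_neg hc, if_neg (by omega : ¬ (L - r < k + 1))]

-- effect of A's inner loop (one whole sequence) on every row of the matrix
theorem pvStepA_spec (s : List Char) (L : Nat) (hs : s.length ≤ L)
    (mat : List (List Int)) (hm : mat.length = L) :
    (pvStepA mat s).length = L ∧
      ∀ r, r < L → (pvStepA mat s).getD r [] = pvRowStep (L - 1 - r) (mat.getD r []) s := by
  obtain ⟨h1, h2⟩ := pvStepA_aux s L hs mat hm (s.length + 1) (le_refl _)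
  have hrange : PySem.List.pyRange 0 ((s.length : Int) + 1) 1
      = (List.range (s.length + 1)).map (fun j => Int.ofNat j) := by
    rw [PySem.List.pyRange_one]
    have ht : (((s.length : Int) + 1) - 0).toNat = s.length + 1 := by omega
    rw [ht]
    apply List.map_congr_left
    intro a _
    simp
  unfold pvStepA
  rw [hrange]
  refine ⟨h1, ?_⟩
  intro r hr
  rw [h2 r hr]
  unfold pvRowStep
  by_cases hc : L - 1 - r < s.length
  · rw [if_pos (by omega : L - r < s.length + 1), if_pos hc]
    have hi : s.length - (L - r) = s.length - 1 - (L - 1 - r) := by omega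
    rw [hi]
  · rw [if_neg (by omega : ¬ (L - r < s.length + 1)), if_neg hc]

-- effect of A's outer loop: each row r accumulates its own left fold over the sequences
theorem pvFoldA_spec (L : Nat) :
    ∀ (css : List (List Char)) (mat : List (List Int)), mat.length = L →
      (∀ s ∈ css, s.length ≤ L) →
      (css.foldl pvStepA mat).length = L ∧
      ∀ r, r < L →
        (css.foldl pvStepA mat).getD r [] =
          css.foldl (fun v s => pvRowStep (L - 1 - r) v s) (mat.getD r []) := by
  intro css
  induction css with
  | nil => intro mat hm _; exact ⟨hm, fun r _ => rfl⟩
  | cons s rest ih =>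
    intro mat hm hbound
    have hs : s.length ≤ L := hbound s (by simp)
    obtain ⟨h1, h2⟩ := pvStepA_spec s L hs mat hm
    obtain ⟨h1', h2'⟩ := ih (pvStepA mat s) h1 (fun t ht => hbound t (by simp [ht]))
    refine ⟨by simpa using h1', ?_⟩
    intro r hr
    simp only [List.foldl_cons]
    rw [h2' r hr, h2 r hr]

-- the per-row left fold with vector additions is B's five-counter column scan
theorem pvRow_eq_col (d : Nat) :
    ∀ (css : List (List Char)) (st : Int × Int × Int × Int × Int),
      css.foldl (fun v s => pvRowStep d v s)
        [st.1, st.2.1, st.2.2.1, st.2.2.2.1, st.2.2.2.2] =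
      [(css.foldl (pvBumpB d) st).1, (css.foldl (pvBumpB d) st).2.1,
       (css.foldl (pvBumpB d) st).2.2.1, (css.foldl (pvBumpB d) st).2.2.2.1,
       (css.foldl (pvBumpB d) st).2.2.2.2] := by
  intro css
  induction css with
  | nil => intro st; rfl
  | cons s rest ih =>
    intro st
    simp only [List.foldl_cons]
    have hstep : pvRowStep d [st.1, st.2.1, st.2.2.1, st.2.2.2.1, st.2.2.2.2] s
        = [(pvBumpB d st s).1, (pvBumpB d st s).2.1, (pvBumpB d st s).2.2.1,
           (pvBumpB d st s).2.2.2.1, (pvBumpB d st s).2.2.2.2] := by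
      unfold pvRowStep pvBumpB pvCountsA
      split_ifs <;> simp_all
    rw [hstep, ih]

-- ===== VERDICT (by name: the statement is the Claim_ definition above) =====
-- assembling: row r of A's matrix is B's column d = L - 1 - r
theorem pvMain (leftseqs : List String) (hpre : leftseqs ≠ []) :
    left_extender leftseqs = left_extender_alt leftseqs := by
  rcases hmax : PySem.List.max? leftseqs PySem.Str.len with _ | m
  · exact absurd ((PySem.List.max?_eq_none_iff _ _).mp hmax) hpre
  · unfold left_extender left_extender_alt
    rw [hmax]
    dsimp only
    set css := leftseqs.map String.toList with hcss
    set L := m.toList.length with hL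
    set mat0 := (PySem.List.pyRange 0 (PySem.Str.len m) 1).map
      (fun _ => ([0, 0, 0, 0, 0] : List Int)) with hmat0
    have hbound : ∀ cs ∈ css, cs.length ≤ L := by
      intro cs hcs
      obtain ⟨t, ht, rfl⟩ := List.mem_map.mp hcs
      have h := PySem.List.max?_isMax hmax t ht
      simp only [PySem.Str.len] at h
      exact_mod_cast h
    have hmat0len : mat0.length = L := by
      rw [hmat0]
      simp [PySem.List.pyRange_one, PySem.Str.len, hL]
    have hmat0get : ∀ r, r < L → mat0.getD r [] = [0, 0, 0, 0, 0] := by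
      intro r hr
      rw [hmat0]
      rw [List.getD_eq_getElem _ [] (by rw [← hmat0]; omega)]
      simp
    have hfoldmap : leftseqs.foldl (fun mat s => pvStepA mat s.toList) mat0
        = css.foldl pvStepA mat0 := by
      rw [hcss, List.foldl_map]
    obtain ⟨hAlen, hAget⟩ := pvFoldA_spec L css mat0 hmat0len hbound
    have hBmap : (List.range L).foldl (fun cols d => cols ++ [pvColCountB css d]) []
        = (List.range L).map (pvColCountB css) := by
      simpa using PySem.List.foldl_append_singleton_eq_map (pvColCountB css) (List.range L) []
    rw [hfoldmap, hBmap]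
    apply List.ext_getElem
    · rw [hAlen]; simp
    · intro i h1 h2
      have hiL : i < L := by rwa [hAlen] at h1
      rw [← List.getD_eq_getElem _ [] h1, hAget i hiL]
      have hrow := pvRow_eq_col (L - 1 - i) css (0, 0, 0, 0, 0)
      have hcol : css.foldl (fun v s => pvRowStep (L - 1 - i) v s) ([0, 0, 0, 0, 0] : List Int)
          = pvColCountB css (L - 1 - i) := by
        simpa [pvColCountB] using hrow
      rw [hmat0get i hiL, hcol]
      rw [List.getElem_reverse]
      have hlen : ((List.range L).map (pvColCountB css)).length = L := by simp
      rw [List.getElem_map]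
      congr 1
      rw [List.getElem_range]
      simp [hlen]

-- ===== VERDICT (by name: the statement is the Claim_ definition above) =====
theorem left_extender_spec : Claim_equal_left_extender := by
  intro leftseqs _ hpre
  unfold Spec_left_extender
  exact pvMain leftseqs hpre
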